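-- pv_equiv track=rewrite | github.com/carlos-Espinoza-perez/simulador-robitca-2026 | rapid_parser.py | _extract_nested_arrays
-- ===== SOURCE A (Python) =====
-- from typing import List, Dict, Any, Tuple, Optional
--
-- def _extract_nested_arrays(text: str) -> List[str]:
--
--     arrays: List[str] = []
--     depth = 0
--     buf: List[str] = []
--     for ch in text:
--         if ch == '[':
--             depth += 1
--             if depth == 2:          # inicio de sub-array
--                 buf = []
--             elif depth > 2:         # arrays más profundos (poco frecuente)
--                 buf.append(ch)
--         elif ch == ']':
--             if depth == 2:          # fin de sub-array
--                 arrays.append(''.join(buf))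
--             elif depth > 2:
--                 buf.append(ch)
--             depth -= 1
--         elif depth >= 2:
--             buf.append(ch)
--     return arrays
-- ===== SOURCE B (Python) =====
-- def _extract_nested_arrays(text):
--     events = [(i, c) for i, c in enumerate(text) if c == '[' or c == ']']
--     arrays = []
--     depth = 0
--     start = 0
--     for i, c in events:
--         if c == '[':
--             depth += 1
--             if depth == 2:
--                 start = i
--         else:
--             if depth == 2:
--                 arrays.append(text[start + 1:i])
--             depth -= 1
--     return arrays
-- ===== Notes on version B (the rewrite author's own statement) =====
-- stated objective: alternative
-- what changed: Replaces the char-by-char buffer accumulation with a two-phase approach: first filter out only the bracket events (index,char), then pair depth-2 opens with depth-2 closes and slice the text between them, eliminating the buffer and all per-character append branches.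
import Mathlib
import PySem

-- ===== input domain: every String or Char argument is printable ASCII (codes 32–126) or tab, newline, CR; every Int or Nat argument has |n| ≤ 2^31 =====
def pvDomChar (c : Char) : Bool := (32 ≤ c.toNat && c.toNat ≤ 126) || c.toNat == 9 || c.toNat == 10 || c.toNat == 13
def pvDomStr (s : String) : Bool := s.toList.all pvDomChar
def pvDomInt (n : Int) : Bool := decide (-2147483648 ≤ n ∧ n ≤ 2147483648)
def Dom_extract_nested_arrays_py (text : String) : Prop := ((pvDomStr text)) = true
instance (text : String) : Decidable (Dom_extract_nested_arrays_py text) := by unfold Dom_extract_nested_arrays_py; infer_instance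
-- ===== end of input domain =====

-- B drops A's character buffer: it filters out the bracket events first, then pairs
-- depth-2 opens with depth-2 closes and slices the text between them (alternative decomposition, same cost).

-- ===== PORT A =====
-- state: (arrays, depth, buf); ''.join(buf) over single chars = String.ofList buf
def pvAStep (st : List String × Int × List Char) (ch : Char) : List String × Int × List Char :=
  let (arrays, depth, buf) := st
  if ch = '[' then
    let depth := depth + 1
    if depth = 2 then (arrays, depth, [])
    else if depth > 2 then (arrays, depth, buf ++ [ch])
    else (arrays, depth, buf)
  else if ch = ']' then
    if depth = 2 then (arrays ++ [String.ofList buf], depth - 1, buf)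
    else if depth > 2 then (arrays, depth - 1, buf ++ [ch])
    else (arrays, depth - 1, buf)
  else if depth ≥ 2 then (arrays, depth, buf ++ [ch])
  else (arrays, depth, buf)

def extract_nested_arrays_py (text : String) : List String :=
  (text.toList.foldl pvAStep ([], 0, [])).1

-- ===== PORT B =====
-- state: (arrays, depth, start); text[start+1:i] = String.ofList (slice cs (start+1) i)
def pvBStep (cs : List Char) (st : List String × Int × Int) (p : Int × Char) :
    List String × Int × Int :=
  let (arrays, depth, start) := st
  let (i, c) := p
  if c = '[' then
    let depth := depth + 1
    if depth = 2 then (arrays, depth, i) else (arrays, depth, start)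
  else
    if depth = 2 then
      (arrays ++ [String.ofList (PySem.List.slice cs (some (start + 1)) (some i))], depth - 1, start)
    else (arrays, depth - 1, start)

def extract_nested_arrays_py_alt (text : String) : List String :=
  let cs := text.toList
  let events := (PySem.List.enumerate cs 0).filter (fun p => p.2 == '[' || p.2 == ']')
  (events.foldl (pvBStep cs) ([], 0, 0)).1

-- ===== PRECONDITION & SPEC =====
def Spec_extract_nested_arrays_py (text : String) (out : List String) : Prop := out = extract_nested_arrays_py_alt text
instance (text : String) (out : List String) : Decidable (Spec_extract_nested_arrays_py text out) := by unfold Spec_extract_nested_arrays_py; infer_instance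

-- ===== CLAIM (what is proved, stated in full; the proofs are below) =====
def Claim_equal_extract_nested_arrays_py : Prop := ∀ (text : String), Dom_extract_nested_arrays_py text → Spec_extract_nested_arrays_py text (extract_nested_arrays_py text)

-- ===== LEMMAS AND PROOFS =====

-- extending the buffered segment by the character at position j
lemma pv_take_ext (cs : List Char) (s j : Nat) (hsj : s + 1 ≤ j) (hj : j < cs.length) :
    (cs.drop (s+1)).take (j + 1 - (s+1)) = (cs.drop (s+1)).take (j - (s+1)) ++ [cs[j]] := by
  have hk : j - (s+1) < (cs.drop (s+1)).length := by
    simp [List.length_drop]; omega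
  have hge : (cs.drop (s+1))[j - (s+1)] = cs[j] := by
    rw [List.getElem_drop]
    congr 1; omega
  have h1 : j + 1 - (s+1) = (j - (s+1)) + 1 := by omega
  rw [h1, List.take_add_one, List.getElem?_eq_getElem hk, hge]
  rfl

lemma pv_head_of_drop (cs : List Char) (j : Nat) (ch : Char) (l : List Char)
    (h : cs.drop j = ch :: l) : j < cs.length ∧ cs[j]? = some ch ∧ cs.drop (j+1) = l := by
  have hlen : j < cs.length := by
    by_contra hc
    rw [List.drop_eq_nil_of_le (by omega)] at h
    exact (List.cons_ne_nil _ _ h.symm)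
  refine ⟨hlen, ?_, ?_⟩
  · have := congrArg (fun t => t[0]?) h
    simpa using this
  · have : cs.drop (j+1) = (cs.drop j).tail := by
      rw [← List.drop_drop]; simp
    rw [this, h]; rfl

-- the main invariant: A's buffer (when depth ≥ 2) is the text segment from start+1 to the
-- current position, and the two folds produce the same arrays component
lemma pv_loop (cs : List Char) (l : List Char) :
    ∀ (j : Nat) (arrs : List String) (depth : Int) (buf : List Char) (start : Int),
    l = cs.drop j →
    (2 ≤ depth → ∃ s : Nat, start = (s : Int) ∧ s + 1 ≤ j ∧
        buf = (cs.drop (s+1)).take (j - (s+1))) →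
    (l.foldl pvAStep (arrs, depth, buf)).1 =
      (((PySem.List.enumerate l (j : Int)).filter (fun p => p.2 == '[' || p.2 == ']')).foldl
        (pvBStep cs) (arrs, depth, start)).1 := by
  induction l with
  | nil => intro j arrs depth buf start _ _; simp [PySem.List.enumerate_nil]
  | cons ch l ih =>
    intro j arrs depth buf start hdrop hinv
    obtain ⟨hjlen, hget, hdrop'⟩ := pv_head_of_drop cs j ch l hdrop.symm
    have hgetE : cs[j] = ch := by
      have h' : cs[j]? = some cs[j] := List.getElem?_eq_getElem hjlen
      rw [hget] at h'
      exact (Option.some_inj.mp h').symm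
    rw [PySem.List.enumerate_cons, List.foldl_cons]
    by_cases hb1 : ch = '['
    · subst hb1
      have hkeep : List.filter (fun p => p.2 == '[' || p.2 == ']')
          (((j : Int), '[') :: PySem.List.enumerate l ((j : Int) + 1))
          = ((j : Int), '[') :: List.filter (fun p => p.2 == '[' || p.2 == ']')
              (PySem.List.enumerate l ((j : Int) + 1)) := by simp
      rw [hkeep, List.foldl_cons]
      by_cases h2 : depth + 1 = 2
      · have hA : pvAStep (arrs, depth, buf) '[' = (arrs, depth + 1, []) := by
          simp [pvAStep, h2]
        have hB : pvBStep cs (arrs, depth, start) ((j : Int), '[') = (arrs, depth + 1, (j : Int)) := by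
          simp [pvBStep, h2]
        rw [hA, hB]
        have hc : ((j : Int) + 1) = (((j + 1 : Nat)) : Int) := by push_cast; ring
        rw [hc]
        exact ih (j+1) arrs (depth+1) [] (j : Int) hdrop'.symm
          (fun _ => ⟨j, rfl, by omega, by simp⟩)
      · by_cases h3 : depth + 1 > 2
        · obtain ⟨s, hs, hsj, hbuf⟩ := hinv (by omega)
          have hA : pvAStep (arrs, depth, buf) '[' = (arrs, depth + 1, buf ++ ['[']) := by
            simp [pvAStep, h2, h3]
          have hB : pvBStep cs (arrs, depth, start) ((j : Int), '[') = (arrs, depth + 1, start) := by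
            simp [pvBStep, h2]
          rw [hA, hB]
          have hc : ((j : Int) + 1) = (((j + 1 : Nat)) : Int) := by push_cast; ring
          rw [hc]
          exact ih (j+1) arrs (depth+1) (buf ++ ['[']) start hdrop'.symm
            (fun _ => ⟨s, hs, by omega, by rw [pv_take_ext cs s j hsj hjlen, hgetE, hbuf]⟩)
        · have hA : pvAStep (arrs, depth, buf) '[' = (arrs, depth + 1, buf) := by
            simp [pvAStep, h2, h3]
          have hB : pvBStep cs (arrs, depth, start) ((j : Int), '[') = (arrs, depth + 1, start) := by
            simp [pvBStep, h2]
          rw [hA, hB]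
          have hc : ((j : Int) + 1) = (((j + 1 : Nat)) : Int) := by push_cast; ring
          rw [hc]
          exact ih (j+1) arrs (depth+1) buf start hdrop'.symm (fun h => by omega)
    · by_cases hb2 : ch = ']'
      · subst hb2
        have hkeep : List.filter (fun p => p.2 == '[' || p.2 == ']')
            (((j : Int), ']') :: PySem.List.enumerate l ((j : Int) + 1))
            = ((j : Int), ']') :: List.filter (fun p => p.2 == '[' || p.2 == ']')
                (PySem.List.enumerate l ((j : Int) + 1)) := by simp
        rw [hkeep, List.foldl_cons]
        by_cases h2 : depth = 2
        · obtain ⟨s, hs, hsj, hbuf⟩ := hinv (by omega)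
          have hA : pvAStep (arrs, depth, buf) ']'
              = (arrs ++ [String.ofList buf], depth - 1, buf) := by
            simp [pvAStep, h2]
          have hB : pvBStep cs (arrs, depth, start) ((j : Int), ']')
              = (arrs ++ [String.ofList buf], depth - 1, start) := by
            have hsl : PySem.List.slice cs (some (start + 1)) (some (j : Int)) = buf := by
              rw [hs]
              have hc : ((s : Int) + 1) = ((s + 1 : Nat) : Int) := by push_cast; ring
              rw [hc, PySem.List.slice_natCast, hbuf]
            simp [pvBStep, h2, hsl]
          rw [hA, hB]
          have hc : ((j : Int) + 1) = (((j + 1 : Nat)) : Int) := by push_cast; ring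
          rw [hc]
          exact ih (j+1) (arrs ++ [String.ofList buf]) (depth - 1) buf start hdrop'.symm
            (fun h => by omega)
        · by_cases h3 : depth > 2
          · obtain ⟨s, hs, hsj, hbuf⟩ := hinv (by omega)
            have hA : pvAStep (arrs, depth, buf) ']' = (arrs, depth - 1, buf ++ [']']) := by
              simp [pvAStep, h2, h3]
            have hB : pvBStep cs (arrs, depth, start) ((j : Int), ']') = (arrs, depth - 1, start) := by
              simp [pvBStep, h2]
            rw [hA, hB]
            have hc : ((j : Int) + 1) = (((j + 1 : Nat)) : Int) := by push_cast; ring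
            rw [hc]
            exact ih (j+1) arrs (depth - 1) (buf ++ [']']) start hdrop'.symm
              (fun _ => ⟨s, hs, by omega, by rw [pv_take_ext cs s j hsj hjlen, hgetE, hbuf]⟩)
          · have hA : pvAStep (arrs, depth, buf) ']' = (arrs, depth - 1, buf) := by
              simp [pvAStep, h2, h3]
            have hB : pvBStep cs (arrs, depth, start) ((j : Int), ']') = (arrs, depth - 1, start) := by
              simp [pvBStep, h2]
            rw [hA, hB]
            have hc : ((j : Int) + 1) = (((j + 1 : Nat)) : Int) := by push_cast; ring
            rw [hc]
            exact ih (j+1) arrs (depth - 1) buf start hdrop'.symm (fun h => by omega)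
      · -- ordinary character: filtered out on B's side
        have hdrop'' : List.filter (fun p => p.2 == '[' || p.2 == ']')
            (((j : Int), ch) :: PySem.List.enumerate l ((j : Int) + 1))
            = List.filter (fun p => p.2 == '[' || p.2 == ']')
                (PySem.List.enumerate l ((j : Int) + 1)) := by
          simp [hb1, hb2]
        rw [hdrop'']
        have hc : ((j : Int) + 1) = (((j + 1 : Nat)) : Int) := by push_cast; ring
        rw [hc]
        by_cases h2 : (2 : Int) ≤ depth
        · obtain ⟨s, hs, hsj, hbuf⟩ := hinv h2
          have hA : pvAStep (arrs, depth, buf) ch = (arrs, depth, buf ++ [ch]) := by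
            simp [pvAStep, hb1, hb2, h2]
          rw [hA]
          exact ih (j+1) arrs depth (buf ++ [ch]) start hdrop'.symm
            (fun _ => ⟨s, hs, by omega, by rw [pv_take_ext cs s j hsj hjlen, hgetE, hbuf]⟩)
        · have hA : pvAStep (arrs, depth, buf) ch = (arrs, depth, buf) := by
            simp [pvAStep, hb1, hb2, h2]
          rw [hA]
          exact ih (j+1) arrs depth buf start hdrop'.symm (fun h => by omega)

-- ===== VERDICT (by name: the statement is the Claim_ definition above) =====
theorem extract_nested_arrays_py_spec : Claim_equal_extract_nested_arrays_py := by
  intro text _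
  unfold Spec_extract_nested_arrays_py extract_nested_arrays_py extract_nested_arrays_py_alt
  exact pv_loop text.toList text.toList 0 [] 0 [] 0 (by simp) (by omega)
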